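-- pv_equiv track=rewrite | github.com/nguyenlab/sc-ast-injector | test_smartbugs_curated.py | parse_filename
-- ===== SOURCE A (Python) =====
-- def parse_filename(filename: str) -> tuple:
--     name = filename.replace('.sol', '')
--
--     # Known vulnerability types
--     vuln_types = [
--         'access_control',
--         'arithmetic',
--         'bad_randomness',
--         'denial_of_service',
--         'front_running',
--         'other',
--         'reentrancy',
--         'short_addresses',
--         'time_manipulation',
--         'unchecked_low_level_calls',
--         'unhandled_exception',
--         'tx_origin',
--         'overflow',
--         'underflow',
--         'timestamp'
--     ]
--
--     # Try to find vuln_type at the end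
--     for vt in sorted(vuln_types, key=len, reverse=True):  # Longest first
--         suffix = f"_{vt}"
--         if name.endswith(suffix):
--             contract_name = name[:-len(suffix)]
--             return contract_name, vt
--
--     # Fallback: split by last underscore
--     parts = name.rsplit('_', 1)
--     if len(parts) == 2:
--         return parts[0], parts[1]
--
--     return name, 'unknown'
-- ===== SOURCE B (Python) =====
-- VULN_TYPES = {
--     'access_control', 'arithmetic', 'bad_randomness', 'denial_of_service',
--     'front_running', 'other', 'reentrancy', 'short_addresses',
--     'time_manipulation', 'unchecked_low_level_calls', 'unhandled_exception',
--     'tx_origin', 'overflow', 'underflow', 'timestamp',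
-- }
--
--
-- def parse_filename(filename: str) -> tuple:
--     name = filename.replace('.sol', '')
--
--     # Scan underscore positions left to right: the first one whose tail is a
--     # known vulnerability type gives the longest matching "_<vt>" suffix.
--     for j, c in enumerate(name):
--         if c == '_' and name[j + 1:] in VULN_TYPES:
--             return name[:j], name[j + 1:]
--
--     # Fallback: split off the part after the last underscore, if any.
--     i = name.rfind('_')
--     if i == -1:
--         return name, 'unknown'
--     return name[:i], name[i + 1:]
-- ===== Notes on version B (the rewrite author's own statement) =====
-- stated objective: alternative
-- what changed: Instead of sorting the 15 vulnerability types by length and testing each as an underscore-prefixed suffix of the name, B scans the name's underscore positions left to right and returns at the first position whose tail is in a precomputed set of vulnerability types (the leftmost underscore gives the longest matching suffix, and no type is an underscore-suffix of another), with the same rsplit-style fallback.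
import Mathlib
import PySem

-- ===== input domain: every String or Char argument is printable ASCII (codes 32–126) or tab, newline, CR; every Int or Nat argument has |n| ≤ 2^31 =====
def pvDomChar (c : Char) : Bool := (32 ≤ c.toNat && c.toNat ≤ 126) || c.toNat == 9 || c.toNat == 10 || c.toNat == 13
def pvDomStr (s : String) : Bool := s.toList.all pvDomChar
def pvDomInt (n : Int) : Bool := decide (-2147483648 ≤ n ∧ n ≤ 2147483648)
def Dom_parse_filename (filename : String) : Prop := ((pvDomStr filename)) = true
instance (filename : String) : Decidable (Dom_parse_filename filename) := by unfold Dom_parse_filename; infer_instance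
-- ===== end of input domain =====

-- B replaces A's sort-the-vuln-list-and-test-each-suffix scan by a single left-to-right scan of the
-- name's underscore positions with one set lookup each (objective: alternative decomposition).

-- ===== PORT A =====
def pvVulnTypesA : List String :=
  ["access_control", "arithmetic", "bad_randomness", "denial_of_service", "front_running",
   "other", "reentrancy", "short_addresses", "time_manipulation", "unchecked_low_level_calls",
   "unhandled_exception", "tx_origin", "overflow", "underflow", "timestamp"]

-- the for-loop with early return over the sorted vuln types
def pvALoop (name : List Char) : List (List Char) → Option (List Char × List Char)
  | [] => none
  | vt :: rest =>
    if PySem.Chars.endswith name ('_' :: vt) then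
      some (PySem.List.slice name none (some (-((('_' :: vt).length : Int)))), vt)
    else pvALoop name rest

def parse_filename (filename : String) : String × String :=
  let name := (PySem.Str.replace filename ".sol" "").toList
  match pvALoop name (PySem.List.sorted (pvVulnTypesA.map String.toList) (fun vt => vt.length) true) with
  | some (cn, vt) => (String.ofList cn, String.ofList vt)
  | none =>
    -- name.rsplit('_', 1) hand-ported via rfind (exact for the one-character separator '_')
    let r := PySem.Chars.rfind name ['_']
    let parts : List (List Char) :=
      if r = -1 then [name]
      else [PySem.List.slice name none (some r), PySem.List.slice name (some (r + 1)) none]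
    match parts with
    | [p0, p1] => (String.ofList p0, String.ofList p1)
    | _ => (String.ofList name, "unknown")

-- ===== PORT B =====
def pvVulnSet : PySem.Set (List Char) :=
  PySem.Set.ofList
    (["access_control", "arithmetic", "bad_randomness", "denial_of_service", "front_running",
      "other", "reentrancy", "short_addresses", "time_manipulation", "unchecked_low_level_calls",
      "unhandled_exception", "tx_origin", "overflow", "underflow", "timestamp"].map String.toList)

-- the for-loop 'for j, c in enumerate(name)' with early return
def pvBLoop (name : List Char) : List Char → Nat → Option (List Char × List Char)
  | [], _ => none
  | c :: rest, j =>
    if c == '_' && PySem.Set.contains pvVulnSet (PySem.List.slice name (some ((j : Int) + 1)) none) then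
      some (PySem.List.slice name none (some (j : Int)), PySem.List.slice name (some ((j : Int) + 1)) none)
    else pvBLoop name rest (j + 1)

def parse_filename_alt (filename : String) : String × String :=
  let name := (PySem.Str.replace filename ".sol" "").toList
  match pvBLoop name name 0 with
  | some (cn, vt) => (String.ofList cn, String.ofList vt)
  | none =>
    let i := PySem.Chars.rfind name ['_']
    if i = -1 then (String.ofList name, "unknown")
    else (String.ofList (PySem.List.slice name none (some i)), String.ofList (PySem.List.slice name (some (i + 1)) none))

-- ===== PRECONDITION & SPEC =====
def Spec_parse_filename (filename : String) (out : String × String) : Prop := out = parse_filename_alt filename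
instance (filename : String) (out : String × String) : Decidable (Spec_parse_filename filename out) := by unfold Spec_parse_filename; infer_instance

-- ===== CLAIM (what is proved, stated in full; the proofs are below) =====
def Claim_equal_parse_filename : Prop := ∀ (filename : String), Dom_parse_filename filename → Spec_parse_filename filename (parse_filename filename)

-- ===== LEMMAS AND PROOFS =====

-- the vuln-type list, on the List Char side (proof-side abbreviation)
def pvV : List (List Char) := pvVulnTypesA.map String.toList

-- A's sorted scan list (proof-side abbreviation)
def pvS : List (List Char) := PySem.List.sorted pvV (fun vt => vt.length) true

-- no '_'-prefixed vuln type is a proper suffix of another one, so at most one can match a given name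
lemma pv_uniq : ∀ v1 ∈ pvV, ∀ v2 ∈ pvV, ('_' :: v1) <:+ ('_' :: v2) → v1 = v2 := by decide

lemma pvS_sub : ∀ vt ∈ pvS, vt ∈ pvV := by decide

lemma pvV_sub : ∀ vt ∈ pvV, vt ∈ pvS := by decide

lemma pvSet_eq : pvVulnSet = pvV := by decide

lemma pvALoop_none (cs : List Char) (l : List (List Char))
    (h : ∀ vt ∈ l, ¬ ('_' :: vt) <:+ cs) : pvALoop cs l = none := by
  induction l with
  | nil => rfl
  | cons vt rest ih =>
    have hend : PySem.Chars.endswith cs ('_' :: vt) = false := by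
      rw [← Bool.not_eq_true, PySem.Chars.endswith_iff]
      exact h vt (List.mem_cons_self)
    simp only [pvALoop, hend, Bool.false_eq_true, if_false]
    exact ih (fun v hv => h v (List.mem_cons_of_mem _ hv))

lemma pvALoop_some (cs vt₀ : List Char) (l : List (List Char)) (hs : ('_' :: vt₀) <:+ cs)
    (hmem : vt₀ ∈ l) (huniq : ∀ vt ∈ l, ('_' :: vt) <:+ cs → vt = vt₀) :
    pvALoop cs l = some (PySem.List.slice cs none (some (-((('_' :: vt₀).length : Int)))), vt₀) := by
  induction l with
  | nil => cases hmem
  | cons vt rest ih =>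
    by_cases hvt : ('_' :: vt) <:+ cs
    · have hv : vt = vt₀ := huniq vt (List.mem_cons_self) hvt
      subst hv
      have hend : PySem.Chars.endswith cs ('_' :: vt) = true := by
        rw [PySem.Chars.endswith_iff]; exact hvt
      simp [pvALoop, hend]
    · have hend : PySem.Chars.endswith cs ('_' :: vt) = false := by
        rw [← Bool.not_eq_true, PySem.Chars.endswith_iff]; exact hvt
      simp only [pvALoop, hend, Bool.false_eq_true, if_false]
      have hmem' : vt₀ ∈ rest := by
        rcases List.mem_cons.1 hmem with h | h
        · exact absurd (h ▸ hs) hvt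
        · exact h
      exact ih hmem' (fun v hv => huniq v (List.mem_cons_of_mem _ hv))

lemma pvBLoop_none (cs : List Char) (hP : ∀ vt ∈ pvV, ¬ ('_' :: vt) <:+ cs) :
    ∀ (tail : List Char) (j : Nat), tail = cs.drop j → pvBLoop cs tail j = none := by
  intro tail
  induction tail with
  | nil => intro j _; rfl
  | cons c rest ih =>
    intro j h
    have hrest : rest = cs.drop (j + 1) := by
      have : cs.drop (j + 1) = (cs.drop j).drop 1 := by
        rw [List.drop_drop]
      rw [this, ← h]
      rfl
    have hslice : PySem.List.slice cs (some ((j : Int) + 1)) none = rest := by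
      have h0 : (0 : Int) ≤ (j : Int) + 1 := by positivity
      have h1 : ((j : Int) + 1).toNat = j + 1 := by omega
      rw [PySem.List.slice_from cs h0, h1, hrest]
    have hcond : (c == '_' && PySem.Set.contains pvVulnSet (PySem.List.slice cs (some ((j : Int) + 1)) none)) = false := by
      rw [hslice]
      by_cases hc : c = '_'
      · subst hc
        simp only [beq_self_eq_true, Bool.true_and]
        rw [← Bool.not_eq_true]
        intro hc2
        have hmem : rest ∈ pvV := pvSet_eq ▸ (PySem.Set.contains_iff _ _).1 hc2
        have hsuf : ('_' :: rest) <:+ cs := by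
          have hd := List.drop_suffix j cs
          rwa [← h] at hd
        exact hP rest hmem hsuf
      · simp [hc]
    simp only [pvBLoop, hcond, Bool.false_eq_true, if_false]
    exact ih (j + 1) hrest

lemma pvBLoop_some (cs a vt₀ : List Char) (ha : a ++ '_' :: vt₀ = cs) (hmem : vt₀ ∈ pvV)
    (huniq : ∀ vt ∈ pvV, ('_' :: vt) <:+ cs → vt = vt₀) :
    ∀ (tail : List Char) (j : Nat), tail = cs.drop j → j ≤ a.length →
    pvBLoop cs tail j = some (PySem.List.slice cs none (some ((a.length : Int))),
                              PySem.List.slice cs (some ((a.length : Int) + 1)) none) := by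
  have hlen : cs.length = a.length + vt₀.length + 1 := by
    rw [← ha]; simp; omega
  intro tail
  induction tail with
  | nil =>
    intro j h hj
    exfalso
    have := congrArg List.length h
    simp at this
    omega
  | cons c rest ih =>
    intro j h hj
    have hrest : rest = cs.drop (j + 1) := by
      have : cs.drop (j + 1) = (cs.drop j).drop 1 := by rw [List.drop_drop]
      rw [this, ← h]; rfl
    have hslice : PySem.List.slice cs (some ((j : Int) + 1)) none = rest := by
      have h0 : (0 : Int) ≤ (j : Int) + 1 := by positivity
      have h1 : ((j : Int) + 1).toNat = j + 1 := by omega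
      rw [PySem.List.slice_from cs h0, h1, hrest]
    by_cases hja : j = a.length
    · subst hja
      have hdrop : cs.drop a.length = '_' :: vt₀ := by
        rw [← ha, List.drop_left]
      rw [hdrop] at h
      simp only [List.cons.injEq] at h
      obtain ⟨hc, hr⟩ := h
      have hcond : (c == '_' && PySem.Set.contains pvVulnSet (PySem.List.slice cs (some ((a.length : Int) + 1)) none)) = true := by
        rw [hslice, hr]
        simp only [Bool.and_eq_true, beq_iff_eq, hc, true_and]
        rw [PySem.Set.contains_iff, pvSet_eq]
        exact hmem
      simp only [pvBLoop, hcond, if_true]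
    · have hjlt : j < a.length := lt_of_le_of_ne hj hja
      have hcond : (c == '_' && PySem.Set.contains pvVulnSet (PySem.List.slice cs (some ((j : Int) + 1)) none)) = false := by
        rw [hslice]
        by_cases hc : c = '_'
        · subst hc
          simp only [beq_self_eq_true, Bool.true_and]
          rw [← Bool.not_eq_true]
          intro hc2
          have hmemr : rest ∈ pvV := pvSet_eq ▸ (PySem.Set.contains_iff _ _).1 hc2
          have hsuf : ('_' :: rest) <:+ cs := by
            have hd := List.drop_suffix j cs
            rwa [← h] at hd
          have heq : rest = vt₀ := huniq rest hmemr hsuf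
          have hlr : rest.length = cs.length - (j + 1) := by rw [hrest]; simp
          rw [heq] at hlr
          omega
        · simp [hc]
      simp only [pvBLoop, hcond, Bool.false_eq_true, if_false]
      exact ih (j + 1) hrest (by omega)

lemma pv_slice_neg (cs a vt₀ : List Char) (ha : a ++ '_' :: vt₀ = cs) :
    PySem.List.slice cs none (some (-((('_' :: vt₀).length : Int)))) =
    PySem.List.slice cs none (some ((a.length : Int))) := by
  have hlen : cs.length = a.length + vt₀.length + 1 := by rw [← ha]; simp; omega
  have h0 : (0 : Int) ≤ (a.length : Int) := by positivity
  rw [PySem.List.slice_to cs h0]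
  have hc : PySem.List.clampIdx cs.length (-((('_' :: vt₀).length : Int))) = a.length := by
    simp only [PySem.List.clampIdx, List.length_cons]
    split_ifs <;> omega
  show List.take (PySem.List.clampIdx cs.length (-((('_' :: vt₀).length : Int))) - 0)
    (List.drop 0 cs) = List.take ((a.length : Int)).toNat cs
  rw [hc]
  simp

lemma pvLoopsEq (cs : List Char) : pvALoop cs pvS = pvBLoop cs cs 0 := by
  by_cases hP : ∃ vt ∈ pvV, ('_' :: vt) <:+ cs
  · obtain ⟨vt₀, hmem, hs⟩ := hP
    obtain ⟨a, ha⟩ := id hs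
    have huniq : ∀ vt ∈ pvV, ('_' :: vt) <:+ cs → vt = vt₀ := by
      intro vt hv hsv
      rcases Nat.le_total ('_' :: vt).length ('_' :: vt₀).length with h | h
      · exact pv_uniq vt hv vt₀ hmem (List.suffix_of_suffix_length_le hsv hs h)
      · exact (pv_uniq vt₀ hmem vt hv (List.suffix_of_suffix_length_le hs hsv h)).symm
    rw [pvALoop_some cs vt₀ pvS hs (pvV_sub vt₀ hmem) (fun v hv => huniq v (pvS_sub v hv)),
        pvBLoop_some cs a vt₀ ha hmem huniq cs 0 rfl (Nat.zero_le _)]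
    have hdrop : PySem.List.slice cs (some ((a.length : Int) + 1)) none = vt₀ := by
      have h0 : (0 : Int) ≤ (a.length : Int) + 1 := by positivity
      rw [PySem.List.slice_from cs h0]
      have : ((a.length : Int) + 1).toNat = a.length + 1 := by omega
      rw [this, ← ha, show ('_' :: vt₀ : List Char) = ['_'] ++ vt₀ from rfl,
          show a.length + 1 = (a ++ ['_']).length by simp, ← List.append_assoc, List.drop_left]
    rw [pv_slice_neg cs a vt₀ ha, hdrop]
  · have hP' : ∀ vt ∈ pvV, ¬ ('_' :: vt) <:+ cs := fun v hv hsv => hP ⟨v, hv, hsv⟩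
    rw [pvALoop_none cs pvS (fun v hv => hP' v (pvS_sub v hv)),
        pvBLoop_none cs hP' cs 0 rfl]

lemma pvBody (cs : List Char) :
    (match pvALoop cs (PySem.List.sorted (pvVulnTypesA.map String.toList) (fun vt => vt.length) true) with
     | some (cn, vt) => (String.ofList cn, String.ofList vt)
     | none =>
       match (if PySem.Chars.rfind cs ['_'] = -1 then [cs]
              else [PySem.List.slice cs none (some (PySem.Chars.rfind cs ['_'])),
                    PySem.List.slice cs (some (PySem.Chars.rfind cs ['_'] + 1)) none]) with
       | [p0, p1] => (String.ofList p0, String.ofList p1)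
       | _ => (String.ofList cs, "unknown")) =
    (match pvBLoop cs cs 0 with
     | some (cn, vt) => (String.ofList cn, String.ofList vt)
     | none =>
       if PySem.Chars.rfind cs ['_'] = -1 then (String.ofList cs, "unknown")
       else (String.ofList (PySem.List.slice cs none (some (PySem.Chars.rfind cs ['_']))),
             String.ofList (PySem.List.slice cs (some (PySem.Chars.rfind cs ['_'] + 1)) none))) := by
  have h := pvLoopsEq cs
  simp only [pvS, pvV] at h
  rw [h]
  cases pvBLoop cs cs 0 with
  | some p => rfl
  | none =>
    by_cases hr : PySem.Chars.rfind cs ['_'] = -1 <;> simp [hr]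

-- ===== VERDICT (by name: the statement is the Claim_ definition above) =====
theorem parse_filename_spec : Claim_equal_parse_filename := by
  intro filename _
  show parse_filename filename = parse_filename_alt filename
  exact pvBody ((PySem.Str.replace filename ".sol" "").toList)
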